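-- pv_equiv track=rewrite | github.com/pypi-data/pypi-mirror-365 | packages/gridgulp/gridgulp-0.3.4-py3-none-any.whl/gridgulp/extractors/dataframe_extractor.py | _extract_vertical_headers
-- ===== SOURCE A (Python) =====
-- from typing import Any
--
-- def _extract_vertical_headers(
--     values_matrix: list[list[Any]], header_rows: int
-- ) -> list[str]:
--     """Extract headers from specified number of rows."""
--     if header_rows == 1:
--         # Single header row
--         header_row = values_matrix[0]
--         return [str(val) if val is not None else f"Col_{i}" for i, val in enumerate(header_row)]
--     else:
--         # Multi-row headers - concatenate
--         headers = []
--         for col_idx in range(len(values_matrix[0])):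
--             header_parts = []
--             for row_idx in range(header_rows):
--                 val = values_matrix[row_idx][col_idx]
--                 if val is not None:
--                     header_parts.append(str(val))
--
--             if header_parts:
--                 headers.append(" ".join(header_parts))
--             else:
--                 headers.append(f"Col_{col_idx}")
--
--         return headers
-- ===== SOURCE B (Python) =====
-- def _extract_vertical_headers(values_matrix, header_rows):
--     """Fold the header rows over one Optional[str] accumulator per column:
--     each header string is grown incrementally as rows are consumed (no
--     header_parts lists, no ' '.join, no single-row special case); a column
--     whose accumulator stays None falls back to Col_<i>."""
--     accs = [None] * len(values_matrix[0])
--     for row in values_matrix[:max(header_rows, 0)]: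
--         accs = [acc if row[i] is None
--                 else (str(row[i]) if acc is None else acc + " " + str(row[i]))
--                 for i, acc in enumerate(accs)]
--     return [acc if acc is not None else f"Col_{i}" for i, acc in enumerate(accs)]
-- ===== Notes on version B (the rewrite author's own statement) =====
-- stated objective: alternative
-- what changed: A branches on header_rows==1 and, per column, collects a header_parts list then ' '.join's it with a fallback; B removes the branch, the parts lists and the join entirely: it folds the sliced header rows over one Optional[str] accumulator per column, growing each joined header string incrementally, with Col_<i> only for columns whose accumulator never got a value. Pre_ excludes exactly the inputs on which A raises IndexError (empty matrix, too few rows, or a header row shorter than the first row).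
import Mathlib
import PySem

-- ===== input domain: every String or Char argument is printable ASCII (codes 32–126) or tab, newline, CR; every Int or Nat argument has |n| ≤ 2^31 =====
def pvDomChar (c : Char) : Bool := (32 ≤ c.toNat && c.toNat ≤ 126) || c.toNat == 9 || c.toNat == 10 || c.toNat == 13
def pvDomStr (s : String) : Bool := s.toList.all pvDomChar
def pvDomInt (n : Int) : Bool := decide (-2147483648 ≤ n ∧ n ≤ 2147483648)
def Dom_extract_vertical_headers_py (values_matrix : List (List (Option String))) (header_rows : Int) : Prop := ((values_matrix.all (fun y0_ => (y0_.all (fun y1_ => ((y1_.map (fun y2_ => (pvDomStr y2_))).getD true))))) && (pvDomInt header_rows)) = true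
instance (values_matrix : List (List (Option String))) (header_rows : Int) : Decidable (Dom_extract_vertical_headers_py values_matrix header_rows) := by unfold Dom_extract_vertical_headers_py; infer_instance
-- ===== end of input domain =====

-- B drops A's single-row branch, the per-column header_parts lists and the ' '.join:
-- it folds the sliced header rows over one Optional-string accumulator per column,
-- growing each joined header incrementally (objective: alternative decomposition).

-- ===== PORT A =====
def extract_vertical_headers_py (values_matrix : List (List (Option String))) (header_rows : Int) : List String :=
  if header_rows = 1 then
    let header_row := (PySem.List.pyGet? values_matrix 0).getD []
    (PySem.List.enumerate header_row).map (fun p =>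
      match p.2 with
      | some v => v
      | none => "Col_" ++ PySem.Int.toStr p.1)
  else
    let ncols : Int := ((PySem.List.pyGet? values_matrix 0).getD []).length
    (PySem.List.pyRange 0 ncols 1).foldl (fun headers col_idx =>
      let header_parts := (PySem.List.pyRange 0 header_rows 1).foldl (fun ps row_idx =>
        let val := (PySem.List.pyGet? ((PySem.List.pyGet? values_matrix row_idx).getD []) col_idx).getD none
        match val with
        | some v => ps ++ [v]
        | none => ps) []
      if header_parts ≠ [] then headers ++ [PySem.Str.join " " header_parts]
      else headers ++ ["Col_" ++ PySem.Int.toStr col_idx]) []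

-- ===== PORT B =====
def extract_vertical_headers_py_alt (values_matrix : List (List (Option String))) (header_rows : Int) : List String :=
  let accs0 : List (Option String) := List.replicate ((PySem.List.pyGet? values_matrix 0).getD []).length none
  let accs := (PySem.List.slice values_matrix none (some (max header_rows 0))).foldl
    (fun accs row =>
      (PySem.List.enumerate accs).map (fun p =>
        match (PySem.List.pyGet? row p.1).getD none with
        | none => p.2
        | some v =>
          match p.2 with
          | none => some v
          | some a => some (a ++ " " ++ v))) accs0
  (PySem.List.enumerate accs).map (fun p =>
    match p.2 with
    | some a => a
    | none => "Col_" ++ PySem.Int.toStr p.1)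

-- ===== PRECONDITION & SPEC =====
-- Pre_ excludes exactly the inputs on which A raises IndexError: an empty matrix, and
-- (when header_rows ≠ 1 and the first row is non-empty) a matrix with fewer than
-- header_rows rows or a header row shorter than the first row.
def Pre_extract_vertical_headers_py (values_matrix : List (List (Option String))) (header_rows : Int) : Prop :=
  values_matrix ≠ [] ∧ (header_rows = 1 ∨ values_matrix.head!.length = 0 ∨
    (header_rows ≤ (values_matrix.length : Int) ∧
      ∀ row ∈ values_matrix.take header_rows.toNat, values_matrix.head!.length ≤ row.length))
instance (values_matrix : List (List (Option String))) (header_rows : Int) : Decidable (Pre_extract_vertical_headers_py values_matrix header_rows) := by unfold Pre_extract_vertical_headers_py; infer_instance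

def pvWitness_extract_vertical_headers_py : List (List (Option String)) × Int :=
  ([[some "a", none], [none, some "b"]], 2)

def Spec_extract_vertical_headers_py (values_matrix : List (List (Option String))) (header_rows : Int) (out : List String) : Prop := out = extract_vertical_headers_py_alt values_matrix header_rows
instance (values_matrix : List (List (Option String))) (header_rows : Int) (out : List String) : Decidable (Spec_extract_vertical_headers_py values_matrix header_rows out) := by unfold Spec_extract_vertical_headers_py; infer_instance

-- ===== CLAIM (what is proved, stated in full; the proofs are below) =====
def Claim_equal_extract_vertical_headers_py : Prop := ∀ (values_matrix : List (List (Option String))) (header_rows : Int), Dom_extract_vertical_headers_py values_matrix header_rows → Pre_extract_vertical_headers_py values_matrix header_rows → Spec_extract_vertical_headers_py values_matrix header_rows (extract_vertical_headers_py values_matrix header_rows)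

-- ===== LEMMAS AND PROOFS =====

-- what one row contributes to the parts list of column k (normal form of A's inner loop)
def pvCellUpd (row : List (Option String)) (k : Nat) (p : List String) : List String :=
  match (PySem.List.pyGet? row (k : Int)).getD none with
  | some v => p ++ [v]
  | none => p

-- the per-column parts list A's inner loop accumulates, over an explicit row list
def pvColParts (rows : List (List (Option String))) (k : Nat) : List String :=
  rows.foldl (fun p row => pvCellUpd row k p) []

-- what one row does to column k's Optional-string accumulator in B
def pvAccStep (row : List (Option String)) (k : Nat) (a : Option String) : Option String :=
  match (PySem.List.pyGet? row (k : Int)).getD none with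
  | none => a
  | some v =>
    match a with
    | none => some v
    | some s => some (s ++ " " ++ v)

-- the accumulator that corresponds to a parts list
def pvAccOf (l : List String) : Option String :=
  if l = [] then none else some (PySem.Str.join " " l)

theorem pv_join_singleton (v : String) : PySem.Str.join " " [v] = v := by
  unfold PySem.Str.join
  simp

theorem pv_join_append (l : List String) (v : String) (h : l ≠ []) :
    PySem.Str.join " " (l ++ [v]) = PySem.Str.join " " l ++ " " ++ v := by
  induction l with
  | nil => exact absurd rfl h
  | cons x xs ih =>
    cases xs with
    | nil =>
      unfold PySem.Str.join
      simp [PySem.Chars.join_cons_cons, PySem.Chars.join_singleton]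
      apply String.ext
      simp
    | cons y ys =>
      have hx : PySem.Str.join " " (x :: (y :: ys) ++ [v])
          = x ++ " " ++ PySem.Str.join " " ((y :: ys) ++ [v]) := by
        unfold PySem.Str.join
        simp only [List.cons_append, List.map_cons, PySem.Chars.join_cons_cons]
        apply String.ext
        simp
      have hx' : PySem.Str.join " " (x :: y :: ys)
          = x ++ " " ++ PySem.Str.join " " (y :: ys) := by
        unfold PySem.Str.join
        simp only [List.map_cons, PySem.Chars.join_cons_cons]
        apply String.ext
        simp
      rw [hx, ih (by simp), hx']
      apply String.ext
      simp

theorem pv_acc_step (row : List (Option String)) (k : Nat) (l : List String) :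
    pvAccStep row k (pvAccOf l) = pvAccOf (pvCellUpd row k l) := by
  unfold pvAccStep pvCellUpd pvAccOf
  cases hc : (PySem.List.pyGet? row (k : Int)).getD none with
  | none => rfl
  | some v =>
    by_cases hl : l = []
    · subst hl
      simp [pv_join_singleton]
    · simp [hl, pv_join_append l v hl]

theorem pv_col_fold (k : Nat) :
    ∀ (R : List (List (Option String))) (l : List String),
      R.foldl (fun a row => pvAccStep row k a) (pvAccOf l)
        = pvAccOf (R.foldl (fun p row => pvCellUpd row k p) l) := by
  intro R
  induction R with
  | nil => intro l; rfl
  | cons row R ih =>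
    intro l
    simp only [List.foldl_cons]
    rw [pv_acc_step row k l, ih (pvCellUpd row k l)]

theorem pv_enum_map {α β : Type} (G : Int × α → β) (d : α) :
    ∀ (xs : List α) (s : Int),
      (PySem.List.enumerate xs s).map G
        = (List.range xs.length).map (fun (k : Nat) => G (s + (k : Int), xs.getD k d)) := by
  intro xs
  induction xs with
  | nil => intro s; simp [PySem.List.enumerate_nil]
  | cons x xs ih =>
    intro s
    rw [PySem.List.enumerate_cons, List.map_cons, ih (s + 1)]
    simp only [List.length_cons, List.range_succ_eq_map, List.map_cons, List.map_map]
    refine congrArg₂ _ (by simp) ?_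
    apply List.map_congr_left
    intro k _
    simp only [Function.comp_apply, List.getD_cons_succ]
    congr 2
    push_cast
    ring

-- B's per-row map step, normalised to a pointwise pvAccStep over the column indices
theorem pv_step_map (row : List (Option String)) (n : Nat) (g : Nat → Option String) :
    (PySem.List.enumerate ((List.range n).map g)).map (fun p =>
        match (PySem.List.pyGet? row p.1).getD none with
        | none => p.2
        | some v =>
          match p.2 with
          | none => some v
          | some a => some (a ++ " " ++ v))
      = (List.range n).map (fun k => pvAccStep row k (g k)) := by
  rw [pv_enum_map _ (none : Option String)]
  simp only [List.length_map, List.length_range]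
  apply List.map_congr_left
  intro k hk
  have hk' : k < n := List.mem_range.mp hk
  rw [PySem.List.getD_map_range _ n k _ hk']
  simp [pvAccStep]

-- B's fold over the rows, columnwise
theorem pv_rows_fold (n : Nat) :
    ∀ (R : List (List (Option String))) (g : Nat → Option String),
      R.foldl (fun accs row =>
          (PySem.List.enumerate accs).map (fun p =>
            match (PySem.List.pyGet? row p.1).getD none with
            | none => p.2
            | some v =>
              match p.2 with
              | none => some v
              | some a => some (a ++ " " ++ v))) ((List.range n).map g)
        = (List.range n).map (fun k => R.foldl (fun a row => pvAccStep row k a) (g k)) := by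
  intro R
  induction R with
  | nil => intro g; simp
  | cons row R ih =>
    intro g
    simp only [List.foldl_cons]
    rw [pv_step_map row n g, ih (fun k => pvAccStep row k (g k))]

-- A's row-index loop over range(header_rows) visits exactly the rows of take header_rows
theorem pv_rows_index_to_take (vm : List (List (Option String))) (hr : Int) (k : Nat)
    (h : hr ≤ (vm.length : Int)) :
    (PySem.List.pyRange 0 hr 1).foldl
        (fun ps r => pvCellUpd ((PySem.List.pyGet? vm r).getD []) k ps) []
      = pvColParts (vm.take (max hr 0).toNat) k := by
  unfold pvColParts
  rcases (by omega : hr ≤ 0 ∨ 0 < hr) with h0 | h0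
  · rw [PySem.List.pyRange_one_eq_nil h0]
    have : (max hr 0).toNat = 0 := by omega
    rw [this]
    simp
  · have hmax : (max hr 0).toNat = hr.toNat := by omega
    rw [hmax]
    have hle : hr.toNat ≤ vm.length := by omega
    have key : ∀ (m : Nat), m ≤ vm.length →
        (PySem.List.pyRange 0 (m : Int) 1).foldl
            (fun ps r => pvCellUpd ((PySem.List.pyGet? vm r).getD []) k ps) []
          = (vm.take m).foldl (fun p row => pvCellUpd row k p) [] := by
      intro m
      induction m with
      | zero => intro _; simp
      | succ m ih =>
        intro hle
        have hcast : ((m + 1 : Nat) : Int) = (m : Int) + 1 := by push_cast; ring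
        rw [hcast, PySem.List.pyRange_one_succ_right (by positivity), List.foldl_append]
        rw [ih (by omega)]
        have hgm : PySem.List.pyGet? vm (m : Int) = some vm[m] :=
          PySem.List.pyGet?_ofNat vm m (by omega)
        rw [List.take_add_one]
        have : vm[m]?.toList = [vm[m]] := by
          rw [List.getElem?_eq_getElem (by omega)]; rfl
        rw [this, List.foldl_append]
        simp [hgm]
    have : (PySem.List.pyRange 0 hr 1) = (PySem.List.pyRange 0 ((hr.toNat : Nat) : Int) 1) := by
      rw [Int.toNat_of_nonneg (by omega : (0:Int) ≤ hr)]
    rw [this, key hr.toNat hle]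

-- B in normal form: one joined header per column index
theorem pv_alt_normal (vm : List (List (Option String))) (hr : Int) :
    extract_vertical_headers_py_alt vm hr
      = (List.range ((PySem.List.pyGet? vm 0).getD []).length).map (fun k =>
          if pvColParts (vm.take (max hr 0).toNat) k ≠ []
          then PySem.Str.join " " (pvColParts (vm.take (max hr 0).toNat) k)
          else "Col_" ++ PySem.Int.toStr (k : Int)) := by
  simp only [extract_vertical_headers_py_alt]
  have hrep : (List.replicate ((PySem.List.pyGet? vm 0).getD []).length (none : Option String))
      = (List.range ((PySem.List.pyGet? vm 0).getD []).length).map (fun _ => none) := by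
    simp [List.map_const']
  rw [hrep]
  rw [PySem.List.slice_to vm (le_max_right hr 0)]
  set n := ((PySem.List.pyGet? vm 0).getD []).length with hn
  rw [pv_rows_fold n (vm.take (max hr 0).toNat) (fun _ => none)]
  have hcol : ∀ k : Nat,
      (vm.take (max hr 0).toNat).foldl (fun a row => pvAccStep row k a) none
        = pvAccOf (pvColParts (vm.take (max hr 0).toNat) k) := by
    intro k
    have h0 : (none : Option String) = pvAccOf [] := rfl
    rw [h0, pv_col_fold k (vm.take (max hr 0).toNat) []]
    rfl
  rw [pv_enum_map _ (none : Option String)]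
  simp only [List.length_map, List.length_range]
  apply List.map_congr_left
  intro k hk
  have hk' : k < n := List.mem_range.mp hk
  rw [PySem.List.getD_map_range _ n k _ hk']
  rw [hcol k]
  unfold pvAccOf
  by_cases hp : pvColParts (vm.take (max hr 0).toNat) k = []
  · simp [hp]
  · simp [hp]

-- ===== VERDICT (by name: the statement is the Claim_ definition above) =====
theorem extract_vertical_headers_py_spec : Claim_equal_extract_vertical_headers_py := by
  intro vm hr _dom hpre
  unfold Spec_extract_vertical_headers_py
  obtain ⟨hne, hcase⟩ := hpre
  obtain ⟨r0, rest, rfl⟩ : ∃ r0 rest, vm = r0 :: rest := by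
    cases vm with
    | nil => exact absurd rfl hne
    | cons a l => exact ⟨a, l, rfl⟩
  rw [pv_alt_normal]
  by_cases h1 : hr = 1
  · -- single-header-row branch
    subst h1
    unfold extract_vertical_headers_py
    rw [if_pos rfl]
    simp only [PySem.List.pyGet?_zero_cons, Option.getD_some]
    refine (pv_enum_map (fun p => match p.2 with
      | some v => v
      | none => "Col_" ++ PySem.Int.toStr p.1) (none : Option String) r0 0).trans ?_
    have hmax : ((max (1:Int) 0).toNat) = 1 := by decide
    rw [hmax]
    apply List.map_congr_left
    intro k hk
    have hk' : k < r0.length := List.mem_range.mp hk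
    have hcp : pvColParts ((r0 :: rest).take 1) k = pvCellUpd r0 k [] := by
      simp [pvColParts]
    have hcell : (PySem.List.pyGet? r0 (k : Int)).getD none = r0[k]'hk' := by
      rw [PySem.List.pyGet?_natCast, List.getElem?_eq_getElem hk']; rfl
    rw [hcp]
    unfold pvCellUpd
    rw [hcell]
    have hgd : r0.getD k none = r0[k]'hk' := List.getD_eq_getElem r0 none hk'
    rw [hgd]
    cases hv : r0[k]'hk' with
    | some v => simp [pv_join_singleton]
    | none => simp
  · -- multi-row branch
    simp only [extract_vertical_headers_py, if_neg h1, PySem.List.pyGet?_zero_cons,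
      Option.getD_some]
    rw [PySem.List.foldl_congr_mem _ _ (fun headers col_idx =>
        headers ++ [if ((PySem.List.pyRange 0 hr 1).foldl (fun ps row_idx =>
            match (PySem.List.pyGet? ((PySem.List.pyGet? (r0 :: rest) row_idx).getD [])
              col_idx).getD none with
            | some v => ps ++ [v]
            | none => ps) []) ≠ []
          then PySem.Str.join " " ((PySem.List.pyRange 0 hr 1).foldl (fun ps row_idx =>
            match (PySem.List.pyGet? ((PySem.List.pyGet? (r0 :: rest) row_idx).getD [])
              col_idx).getD none with
            | some v => ps ++ [v]
            | none => ps) [])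
          else "Col_" ++ PySem.Int.toStr col_idx]) []
      (by intro acc x _; beta_reduce; split_ifs <;> rfl)]
    rw [PySem.List.foldl_append_singleton_eq_map]
    rw [PySem.List.pyRange_zero_nat, List.map_map, List.nil_append]
    apply List.map_congr_left
    intro k hk
    have hk' : k < r0.length := List.mem_range.mp hk
    -- the column-k parts lists of A and B coincide
    have hAB : ((PySem.List.pyRange 0 hr 1).foldl (fun ps row_idx =>
        let val := (PySem.List.pyGet? ((PySem.List.pyGet? (r0 :: rest) row_idx).getD [])
          ((k : Nat) : Int)).getD none
        match val with
        | some v => ps ++ [v]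
        | none => ps) []) = pvColParts ((r0 :: rest).take (max hr 0).toNat) k := by
      rcases hcase with hc | hc | ⟨hle, _⟩
      · exact absurd hc h1
      · -- first row empty: impossible here since k < r0.length
        simp only [List.head!] at hc
        omega
      · exact pv_rows_index_to_take (r0 :: rest) hr k hle
    simp only [Function.comp_apply]
    rw [hAB]
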